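-- pv_equiv track=rewrite | github.com/KlimVladMaks/chess-dungeon | spell.py | draw_rhomb
-- ===== SOURCE A (Python) =====
-- def draw_rhomb(r_start, r_end, x0, y0) -> list[tuple[int, int]]:
--     """
--     Одно из правил выделения зоны, что встречается часто
--     """
--
--     #Хранилище
--     rhomb = []
--
--     #Перебераем радиусы
--     for r in range(r_start, r_end + 1):
--         x = x0
--         y = y0 + r
--
--         #выполняем обход по "ромбу" сетки основа которого - крест с дальностью r
--         for i in range(4 * r):
--             if i < r:
--                 x += 1
--             elif i < 3 * r:
--                 x -= 1
--             else:
--                 x += 1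
--
--             if i < 2 * r:
--                 y -= 1
--             else:
--                 y += 1
--
--             rhomb.append((x, y))
--
--     return rhomb
-- ===== SOURCE B (Python) =====
-- def draw_rhomb(r_start, r_end, x0, y0) -> list[tuple[int, int]]:
--     rhomb = []
--     for r in range(r_start, r_end + 1):
--         rhomb += [(x0 + i, y0 + r - i) for i in range(1, r + 1)]
--         rhomb += [(x0 + r - i, y0 - i) for i in range(1, r + 1)]
--         rhomb += [(x0 - i, y0 - r + i) for i in range(1, r + 1)]
--         rhomb += [(x0 - r + i, y0 + i) for i in range(1, r + 1)]
--     return rhomb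
-- ===== Notes on version B (the rewrite author's own statement) =====
-- stated objective: simpler
-- what changed: Each diamond ring is emitted as four explicit straight edges via direct coordinate formulas (four comprehensions per radius) instead of walking one 4r-step perimeter loop with a per-step if-chain updating mutable x,y.
import Mathlib
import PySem

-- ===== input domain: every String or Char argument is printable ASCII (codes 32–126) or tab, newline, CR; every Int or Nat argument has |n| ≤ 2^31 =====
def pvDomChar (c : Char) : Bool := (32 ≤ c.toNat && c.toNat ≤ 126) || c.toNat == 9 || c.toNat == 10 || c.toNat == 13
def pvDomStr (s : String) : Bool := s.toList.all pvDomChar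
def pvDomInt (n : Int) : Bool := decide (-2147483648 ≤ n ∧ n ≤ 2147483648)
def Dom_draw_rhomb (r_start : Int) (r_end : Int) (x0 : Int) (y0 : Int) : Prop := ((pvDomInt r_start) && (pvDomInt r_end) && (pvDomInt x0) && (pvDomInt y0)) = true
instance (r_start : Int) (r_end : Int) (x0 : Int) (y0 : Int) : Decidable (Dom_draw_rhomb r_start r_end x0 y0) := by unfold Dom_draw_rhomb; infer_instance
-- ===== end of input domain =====

-- B emits each ring as four explicit straight edges (direct coordinate formulas) instead of
-- A's single 4r-step perimeter walk with a per-step branch chain; same output, simpler code.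

-- ===== PORT A =====
-- one step of A's inner perimeter loop: state (x, y, rhomb), index i
def drawStep (r : Int) (st : Int × Int × List (Int × Int)) (i : Int) : Int × Int × List (Int × Int) :=
  let x := if i < r then st.1 + 1 else if i < 3 * r then st.1 - 1 else st.1 + 1
  let y := if i < 2 * r then st.2.1 - 1 else st.2.1 + 1
  (x, y, st.2.2 ++ [(x, y)])

def draw_rhomb (r_start : Int) (r_end : Int) (x0 : Int) (y0 : Int) : List (Int × Int) :=
  (PySem.List.pyRange r_start (r_end + 1) 1).foldl
    (fun acc r =>
      ((PySem.List.pyRange 0 (4 * r) 1).foldl (drawStep r) (x0, y0 + r, acc)).2.2)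
    []

-- ===== PORT B =====
def draw_rhomb_alt (r_start : Int) (r_end : Int) (x0 : Int) (y0 : Int) : List (Int × Int) :=
  (PySem.List.pyRange r_start (r_end + 1) 1).foldl
    (fun acc r =>
      acc
        ++ (PySem.List.pyRange 1 (r + 1) 1).map (fun i => (x0 + i, y0 + r - i))
        ++ (PySem.List.pyRange 1 (r + 1) 1).map (fun i => (x0 + r - i, y0 - i))
        ++ (PySem.List.pyRange 1 (r + 1) 1).map (fun i => (x0 - i, y0 - r + i))
        ++ (PySem.List.pyRange 1 (r + 1) 1).map (fun i => (x0 - r + i, y0 + i)))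
    []

-- ===== PRECONDITION & SPEC =====
def Spec_draw_rhomb (r_start : Int) (r_end : Int) (x0 : Int) (y0 : Int) (out : List (Int × Int)) : Prop := out = draw_rhomb_alt r_start r_end x0 y0
instance (r_start : Int) (r_end : Int) (x0 : Int) (y0 : Int) (out : List (Int × Int)) : Decidable (Spec_draw_rhomb r_start r_end x0 y0 out) := by unfold Spec_draw_rhomb; infer_instance

-- ===== CLAIM (what is proved, stated in full; the proofs are below) =====
def Claim_equal_draw_rhomb : Prop := ∀ (r_start : Int) (r_end : Int) (x0 : Int) (y0 : Int), Dom_draw_rhomb r_start r_end x0 y0 → Spec_draw_rhomb r_start r_end x0 y0 (draw_rhomb r_start r_end x0 y0)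

-- ===== LEMMAS AND PROOFS =====

-- A's inner loop over a segment on which both branch deltas are constant (dx, dy):
-- closed form of the resulting state and emitted points.
theorem fold_seg (r dx dy : Int) (l : List Int) (x y : Int) (acc : List (Int × Int))
    (hx : ∀ i ∈ l, (if i < r then (1 : Int) else if i < 3 * r then -1 else 1) = dx)
    (hy : ∀ i ∈ l, (if i < 2 * r then (-1 : Int) else 1) = dy) :
    l.foldl (drawStep r) (x, y, acc)
      = (x + dx * l.length, y + dy * l.length,
         acc ++ (List.range l.length).map (fun k : Nat => (x + dx * ((k : Int) + 1), y + dy * ((k : Int) + 1)))) := by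
  induction l generalizing x y acc with
  | nil => simp
  | cons i tl ih =>
    have hxi := hx i (by simp)
    have hyi := hy i (by simp)
    have ex : (if i < r then x + 1 else if i < 3 * r then x - 1 else x + 1) = x + dx := by
      rw [← hxi]; split_ifs <;> ring
    have ey : (if i < 2 * r then y - 1 else y + 1) = y + dy := by
      rw [← hyi]; split_ifs <;> ring
    have step : drawStep r (x, y, acc) i = (x + dx, y + dy, acc ++ [(x + dx, y + dy)]) := by
      simp only [drawStep, ex, ey]
    rw [List.foldl_cons, step,
        ih (x + dx) (y + dy) (acc ++ [(x + dx, y + dy)])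
          (fun j hj => hx j (by simp [hj])) (fun j hj => hy j (by simp [hj]))]
    refine Prod.ext ?_ (Prod.ext ?_ ?_)
    · show x + dx + dx * (tl.length : Int) = x + dx * ((tl.length + 1 : Nat) : Int)
      push_cast; ring
    · show y + dy + dy * (tl.length : Int) = y + dy * ((tl.length + 1 : Nat) : Int)
      push_cast; ring
    · show acc ++ [(x + dx, y + dy)] ++ _ = acc ++ _
      rw [List.append_assoc]
      congr 1
      simp only [List.length_cons, List.range_succ_eq_map, List.map_cons, List.map_map,
        List.singleton_append]
      congr 1
      · refine Prod.ext ?_ ?_ <;> push_cast <;> ring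
      · apply List.map_congr_left
        intro k _
        refine Prod.ext ?_ ?_ <;> simp only [Function.comp] <;> push_cast <;> ring

-- per-radius body equality: A's perimeter walk emits exactly B's four edges
theorem body_eq (r x0 y0 : Int) (acc : List (Int × Int)) :
    ((PySem.List.pyRange 0 (4 * r) 1).foldl (drawStep r) (x0, y0 + r, acc)).2.2
      = acc
        ++ (PySem.List.pyRange 1 (r + 1) 1).map (fun i => (x0 + i, y0 + r - i))
        ++ (PySem.List.pyRange 1 (r + 1) 1).map (fun i => (x0 + r - i, y0 - i))
        ++ (PySem.List.pyRange 1 (r + 1) 1).map (fun i => (x0 - i, y0 - r + i))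
        ++ (PySem.List.pyRange 1 (r + 1) 1).map (fun i => (x0 - r + i, y0 + i)) := by
  rcases le_or_gt r 0 with hr | hr
  · rw [PySem.List.pyRange_one_eq_nil (by omega), PySem.List.pyRange_one_eq_nil (by omega)]
    simp
  · have hsplit : PySem.List.pyRange 0 (4 * r) 1
        = PySem.List.pyRange 0 r 1 ++ PySem.List.pyRange r (2 * r) 1
          ++ PySem.List.pyRange (2 * r) (3 * r) 1 ++ PySem.List.pyRange (3 * r) (4 * r) 1 := by
      rw [PySem.List.pyRange_one_append 0 (3 * r) (4 * r) (by omega) (by omega),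
          PySem.List.pyRange_one_append 0 (2 * r) (3 * r) (by omega) (by omega),
          PySem.List.pyRange_one_append 0 r (2 * r) (by omega) (by omega)]
    have hn : ∀ a b : Int, b - a = r → (PySem.List.pyRange a b 1).length = r.toNat := by
      intro a b h; rw [PySem.List.length_pyRange_one, h]
    have hcast : (r.toNat : Int) = r := Int.toNat_of_nonneg hr.le
    have edge : ∀ f : Int → Int × Int,
        (PySem.List.pyRange 1 (r + 1) 1).map f
          = (List.range r.toNat).map (fun k : Nat => f (1 + (k : Int))) := by
      intro f
      rw [PySem.List.pyRange_one, List.map_map]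
      congr 2
      omega
    have hseg : ∀ (a b dx dy x y : Int) (A : List (Int × Int)),
        b - a = r →
        (∀ i : Int, a ≤ i → i < b → (if i < r then (1 : Int) else if i < 3 * r then -1 else 1) = dx) →
        (∀ i : Int, a ≤ i → i < b → (if i < 2 * r then (-1 : Int) else 1) = dy) →
        List.foldl (drawStep r) (x, y, A) (PySem.List.pyRange a b 1)
          = (x + dx * r, y + dy * r,
             A ++ (List.range r.toNat).map
               (fun k : Nat => (x + dx * ((k : Int) + 1), y + dy * ((k : Int) + 1)))) := by
      intro a b dx dy x y A hab hdx hdy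
      rw [fold_seg r dx dy (PySem.List.pyRange a b 1) x y A
            (by intro i hi; rw [PySem.List.mem_pyRange_one] at hi; exact hdx i hi.1 hi.2)
            (by intro i hi; rw [PySem.List.mem_pyRange_one] at hi; exact hdy i hi.1 hi.2),
          hn a b hab, hcast]
    rw [hsplit, List.foldl_append, List.foldl_append, List.foldl_append,
        hseg 0 r 1 (-1) _ _ _ (by ring)
          (fun i h1 h2 => by split_ifs <;> omega) (fun i h1 h2 => by split_ifs <;> omega),
        hseg r (2 * r) (-1) (-1) _ _ _ (by ring)
          (fun i h1 h2 => by split_ifs <;> omega) (fun i h1 h2 => by split_ifs <;> omega),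
        hseg (2 * r) (3 * r) (-1) 1 _ _ _ (by ring)
          (fun i h1 h2 => by split_ifs <;> omega) (fun i h1 h2 => by split_ifs <;> omega),
        hseg (3 * r) (4 * r) 1 1 _ _ _ (by ring)
          (fun i h1 h2 => by split_ifs <;> omega) (fun i h1 h2 => by split_ifs <;> omega)]
    simp only [edge, List.append_assoc]
    congr 1
    congr 1
    · apply List.map_congr_left; intro k _
      refine Prod.ext ?_ ?_ <;> push_cast <;> ring
    congr 1
    · apply List.map_congr_left; intro k _
      refine Prod.ext ?_ ?_ <;> push_cast <;> ring
    congr 1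
    · apply List.map_congr_left; intro k _
      refine Prod.ext ?_ ?_ <;> push_cast <;> ring
    · apply List.map_congr_left; intro k _
      refine Prod.ext ?_ ?_ <;> push_cast <;> ring

-- ===== VERDICT (by name: the statement is the Claim_ definition above) =====
theorem draw_rhomb_spec : Claim_equal_draw_rhomb := by
  intro r_start r_end x0 y0 _
  show draw_rhomb r_start r_end x0 y0 = draw_rhomb_alt r_start r_end x0 y0
  unfold draw_rhomb draw_rhomb_alt
  apply PySem.List.foldl_congr_mem
  intro acc r _
  rw [body_eq]
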